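-- pv_equiv track=rewrite | github.com/mathewkaminski/lastminutesearch | VSCode/aa_RecLeagueDB/src/utils/league_id_generator.py | keys_match
-- ===== SOURCE A (Python) =====
-- MIN_OVERLAP_FIELDS = 3
--
-- def _is_empty(val) -> bool:
--     """Check if a uniqueness key value is empty/unknown."""
--     if val is None:
--         return True
--     if isinstance(val, str) and val.strip() in ("", "none"):
--         return True
--     return False
--
-- def keys_match(key_a: dict, key_b: dict) -> bool:
--     """Check if two uniqueness keys represent the same league.
--
--     Rules:
--     - Empty/None on either side = wildcard (skip that field)
--     - Both non-empty and equal = match on that field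
--     - Both non-empty and different = not the same league
--     - At least MIN_OVERLAP_FIELDS must be non-empty on BOTH sides
--
--     Args:
--         key_a: Uniqueness key dict (from build_uniqueness_key)
--         key_b: Uniqueness key dict
--
--     Returns:
--         True if keys represent the same league
--     """
--     overlap_count = 0
--
--     for field in key_a:
--         val_a = key_a[field]
--         val_b = key_b.get(field)
--
--         a_empty = _is_empty(val_a)
--         b_empty = _is_empty(val_b)
--
--         if a_empty or b_empty:
--             continue
--
--         # Both non-empty: must be equal
--         if val_a != val_b:
--             return False
--
--         overlap_count += 1
--
--     return overlap_count >= MIN_OVERLAP_FIELDS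
-- ===== SOURCE B (Python) =====
-- MIN_OVERLAP_FIELDS = 3
--
-- def _is_empty(val) -> bool:
--     """Check if a uniqueness key value is empty/unknown."""
--     if val is None:
--         return True
--     if isinstance(val, str) and val.strip() in ("", "none"):
--         return True
--     return False
--
-- def keys_match(key_a: dict, key_b: dict) -> bool:
--     # Arithmetic formulation, no early exit: count the confirming fields
--     # (non-empty in key_a and literally equal in key_b -- equality already
--     # implies key_b's side is non-empty) and, independently, the conflicting
--     # fields (non-empty on both sides but unequal).  The keys match iff no
--     # field conflicts and at least MIN_OVERLAP_FIELDS fields confirm.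
--     matches = sum(1 for f, v in key_a.items()
--                   if not _is_empty(v) and key_b.get(f) == v)
--     conflicts = sum(1 for f, v in key_a.items()
--                     if not _is_empty(v) and not _is_empty(key_b.get(f))
--                     and key_b.get(f) != v)
--     return conflicts == 0 and matches >= MIN_OVERLAP_FIELDS
-- ===== Notes on version B (the rewrite author's own statement) =====
-- stated objective: alternative
-- what changed: Replaced A's single fused loop (running overlap counter with an early return on the first mismatch) by an arithmetic formulation: two independent counts over key_a's items -- confirming fields (non-empty and equal in key_b) and conflicting fields (non-empty on both sides but unequal) -- combined as 'conflicts == 0 and matches >= MIN_OVERLAP_FIELDS'.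
import Mathlib
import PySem

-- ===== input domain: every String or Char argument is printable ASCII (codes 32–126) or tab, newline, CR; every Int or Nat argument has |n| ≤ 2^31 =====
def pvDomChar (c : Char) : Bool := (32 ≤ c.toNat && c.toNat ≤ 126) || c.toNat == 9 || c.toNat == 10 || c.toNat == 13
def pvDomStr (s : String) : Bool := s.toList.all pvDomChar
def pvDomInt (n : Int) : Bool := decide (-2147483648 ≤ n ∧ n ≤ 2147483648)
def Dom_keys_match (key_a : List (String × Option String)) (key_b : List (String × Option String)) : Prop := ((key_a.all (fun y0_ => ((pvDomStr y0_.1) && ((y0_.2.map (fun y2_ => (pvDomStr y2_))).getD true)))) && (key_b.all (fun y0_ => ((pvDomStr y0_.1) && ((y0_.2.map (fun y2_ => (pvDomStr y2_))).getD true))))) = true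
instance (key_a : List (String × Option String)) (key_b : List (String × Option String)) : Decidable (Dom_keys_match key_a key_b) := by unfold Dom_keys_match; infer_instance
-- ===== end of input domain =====

-- B replaces A's fused counting loop with an early return by two independent
-- arithmetic counts (confirming fields, conflicting fields) and a final
-- comparison; objective: alternative decomposition, same O(n) cost.

-- ===== PORT A =====
-- A iterates the keys of key_a (Python dict: insertion order, duplicates
-- collapse via Dict.ofList) with a running overlap count and an early
-- return on a mismatch.
def MIN_OVERLAP_FIELDS : Int := 3

def pvIsEmpty (val : Option String) : Bool :=
  match val with
  | none => true
  | some s => PySem.Str.strip s == "" || PySem.Str.strip s == "none"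

def keysMatchLoop (da db : PySem.Dict String (Option String)) :
    List String → Int → Bool
  | [], overlap_count => decide (overlap_count ≥ MIN_OVERLAP_FIELDS)
  | f :: rest, overlap_count =>
    let val_a := da.getD f none      -- key_a[field] (f comes from da.keys, so present)
    let val_b := db.getD f none      -- key_b.get(field)
    if pvIsEmpty val_a || pvIsEmpty val_b then
      keysMatchLoop da db rest overlap_count
    else if val_a ≠ val_b then false
    else keysMatchLoop da db rest (overlap_count + 1)

def keys_match (key_a : List (String × Option String)) (key_b : List (String × Option String)) : Bool :=
  let da := PySem.Dict.ofList key_a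
  let db := PySem.Dict.ofList key_b
  keysMatchLoop da db da.keys 0

-- ===== PORT B =====
-- B: count confirming fields and conflicting fields in two independent
-- passes over key_a's items, then decide arithmetically.
def keys_match_alt (key_a : List (String × Option String)) (key_b : List (String × Option String)) : Bool :=
  let da := PySem.Dict.ofList key_a
  let db := PySem.Dict.ofList key_b
  let matches_ := da.items.countP
    (fun p => !pvIsEmpty p.2 && db.getD p.1 none == p.2)
  let conflicts := da.items.countP
    (fun p => !pvIsEmpty p.2 && !pvIsEmpty (db.getD p.1 none) && db.getD p.1 none != p.2)
  decide (conflicts = 0) && decide ((matches_ : Int) ≥ MIN_OVERLAP_FIELDS)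

-- ===== PRECONDITION & SPEC =====
def Spec_keys_match (key_a : List (String × Option String)) (key_b : List (String × Option String)) (out : Bool) : Prop := out = keys_match_alt key_a key_b
instance (key_a : List (String × Option String)) (key_b : List (String × Option String)) (out : Bool) : Decidable (Spec_keys_match key_a key_b out) := by unfold Spec_keys_match; infer_instance

-- ===== CLAIM (what is proved, stated in full; the proofs are below) =====
def Claim_equal_keys_match : Prop := ∀ (key_a : List (String × Option String)) (key_b : List (String × Option String)), Dom_keys_match key_a key_b → Spec_keys_match key_a key_b (keys_match key_a key_b)

-- ===== LEMMAS AND PROOFS =====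
theorem keysMatchLoop_eq (da db : PySem.Dict String (Option String))
    (l : List (String × Option String)) (c : Int)
    (h : ∀ p ∈ l, da.getD p.1 none = p.2) :
    keysMatchLoop da db (l.map Prod.fst) c =
      (decide (l.countP
          (fun p => !pvIsEmpty p.2 && !pvIsEmpty (db.getD p.1 none) && db.getD p.1 none != p.2) = 0) &&
       decide (c + (l.countP (fun p => !pvIsEmpty p.2 && db.getD p.1 none == p.2) : Int)
          ≥ MIN_OVERLAP_FIELDS)) := by
  induction l generalizing c with
  | nil => simp [keysMatchLoop]
  | cons p rest ih =>
    obtain ⟨f, v⟩ := p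
    have hfv : da.getD f none = v := h (f, v) (by simp)
    have hrest : ∀ q ∈ rest, da.getD q.1 none = q.2 := fun q hq => h q (by simp [hq])
    by_cases h1 : pvIsEmpty v = true
    · simp only [List.map_cons, keysMatchLoop, hfv, h1, Bool.true_or, if_true,
        List.countP_cons, ih c hrest]
      rfl
    · by_cases h2 : pvIsEmpty (db.getD f none) = true
      · have hne : (db.getD f none == v) = false := by
          rcases hq : db.getD f none == v with _ | _
          · rfl
          · exact absurd (beq_iff_eq.mp hq ▸ h2) (by simp [h1])
        simp only [List.map_cons, keysMatchLoop, hfv, h1, h2, Bool.false_or, if_true,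
          List.countP_cons, ih c hrest, hne, Bool.not_true, Bool.false_and,
          Bool.and_false]
        rfl
      · by_cases hq : db.getD f none = v
        · simp only [List.map_cons, keysMatchLoop, hfv, h1, Bool.or_self,
            Bool.false_eq_true, if_false, hq, ne_eq, not_true_eq_false,
            List.countP_cons, ih (c + 1) hrest]
          simp only [beq_self_eq_true, bne_self_eq_false, Bool.and_false,
            Bool.not_false, if_true, Bool.and_self]
          congr 1
          simp only [decide_eq_decide]
          push_cast
          constructor <;> intro <;> omega
        · simp [keysMatchLoop, hfv, h1, h2, hq, Ne.symm hq]

-- ===== VERDICT (by name: the statement is the Claim_ definition above) =====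
theorem keys_match_spec : Claim_equal_keys_match := by
  intro key_a key_b _
  unfold Spec_keys_match keys_match keys_match_alt
  have hnd := PySem.Dict.nodup_keys_ofList key_a
  have h : ∀ p ∈ (PySem.Dict.ofList key_a).items,
      (PySem.Dict.ofList key_a).getD p.1 none = p.2 := by
    rintro ⟨k, v⟩ hp
    exact PySem.Dict.getD_of_mem_items _ hp hnd none
  have hk : (PySem.Dict.ofList key_a).keys
      = (PySem.Dict.ofList key_a).items.map Prod.fst := rfl
  dsimp only
  rw [hk, keysMatchLoop_eq _ _ _ _ h]
  norm_num
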